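-- pv_equiv track=rewrite | github.com/geraldinegautier/ada-exercices-individuels | EX11_suite_de_conway/conway.py | decoupeChaine
-- ===== SOURCE A (Python) =====
-- def decoupeChaine(string_initial):
--     string_output = string_initial[0]
--     index=1
--     while index < len(string_initial):
--         if string_initial[index] == string_initial[index-1]:
--             string_output += string_initial[index]
--         else:
--             string_output += " " + string_initial[index]
--         index +=1
--     return string_output
-- ===== SOURCE B (Python) =====
-- def decoupeChaine(string_initial):
--     groups = []
--     i = 0
--     n = len(string_initial)
--     while i < n:
--         j = i
--         while j < n and string_initial[j] == string_initial[i]: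
--             j += 1
--         groups.append(string_initial[i:j])
--         i = j
--     return ' '.join(groups)
-- ===== Notes on version B (the rewrite author's own statement) =====
-- stated objective: faster
-- what changed: B splits the string into maximal runs of identical characters and joins the runs with a single space via str.join (group-then-join), instead of A's character-by-character accumulation via repeated string concatenation.
-- outside the precondition, e.g. on decoupeChaine(''): A raises IndexError, B returns ''
-- crash fix: On the empty string A raises IndexError (string_initial[0]); B returns ''. — e.g. on decoupeChaine(""): A raises IndexError, B returns ""
import Mathlib
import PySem

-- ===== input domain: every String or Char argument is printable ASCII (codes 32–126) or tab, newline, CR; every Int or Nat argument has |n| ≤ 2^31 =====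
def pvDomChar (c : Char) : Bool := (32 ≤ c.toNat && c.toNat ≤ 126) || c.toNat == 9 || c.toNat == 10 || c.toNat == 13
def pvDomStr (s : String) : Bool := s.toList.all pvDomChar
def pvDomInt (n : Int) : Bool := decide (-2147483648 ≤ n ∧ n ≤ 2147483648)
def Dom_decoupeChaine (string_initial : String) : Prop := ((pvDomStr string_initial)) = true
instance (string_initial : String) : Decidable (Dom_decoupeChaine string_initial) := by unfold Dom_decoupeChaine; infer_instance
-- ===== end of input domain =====

-- B splits the string into maximal runs of identical characters and joins them with
-- spaces (group-then-join), instead of A's per-character comparison with the previous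
-- character; on the empty string A raises IndexError while B returns "".


-- ===== PORT A =====
-- the while loop of A: index-based scan comparing s[index] with s[index-1]
def aLoop (cs : List Char) (index : Nat) (string_output : List Char) : List Char :=
  if index < cs.length then
    aLoop cs (index + 1)
      (string_output ++
        (if cs.getD index ' ' == cs.getD (index - 1) ' '
          then [cs.getD index ' ']
          else [' ', cs.getD index ' ']))
  else string_output
termination_by cs.length - index

def decoupeChaine (string_initial : String) : String :=
  -- string_initial[0] raises IndexError on the empty string: excluded by Pre_
  String.ofList (aLoop string_initial.toList 1 (string_initial.toList.take 1))

-- ===== PORT B =====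
-- the outer while loop of B: split into maximal runs of identical characters
def bGroups (cs : List Char) : List (List Char) :=
  match cs with
  | [] => []
  | c :: rest =>
      (c :: rest.takeWhile (· == c)) :: bGroups (rest.dropWhile (· == c))
termination_by cs.length
decreasing_by
  simpa using Nat.lt_succ_of_le (List.length_dropWhile_le (· == c) rest)

def decoupeChaine_alt (string_initial : String) : String :=
  String.ofList (List.intercalate [' '] (bGroups string_initial.toList))

-- ===== PRECONDITION & SPEC =====
-- Pre_ excludes only the empty string, on which A raises IndexError.
def Pre_decoupeChaine (string_initial : String) : Prop := string_initial ≠ ""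
instance (string_initial : String) : Decidable (Pre_decoupeChaine string_initial) := by
  unfold Pre_decoupeChaine; infer_instance
def pvWitness_decoupeChaine : String := "aab c"

-- On the empty string A raises IndexError (string_initial[0]); B returns "" (theorem decoupeChaine_raises below).
def Raises_decoupeChaine (string_initial : String) : Prop := string_initial = ""
instance (string_initial : String) : Decidable (Raises_decoupeChaine string_initial) := by
  unfold Raises_decoupeChaine; infer_instance
def pvRaiseWitness_decoupeChaine : String := ""
def pvRaiseWitnessOut_decoupeChaine : String := ""

def Spec_decoupeChaine (string_initial : String) (out : String) : Prop := out = decoupeChaine_alt string_initial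
instance (string_initial : String) (out : String) : Decidable (Spec_decoupeChaine string_initial out) := by unfold Spec_decoupeChaine; infer_instance

-- ===== CLAIM (what is proved, stated in full; the proofs are below) =====
def Claim_equal_decoupeChaine : Prop := ∀ (string_initial : String), Dom_decoupeChaine string_initial → Pre_decoupeChaine string_initial → Spec_decoupeChaine string_initial (decoupeChaine string_initial)
def Claim_raises_decoupeChaine : Prop := (∀ (string_initial : String), Dom_decoupeChaine string_initial → Raises_decoupeChaine string_initial → ¬ Pre_decoupeChaine string_initial) ∧ (Dom_decoupeChaine (pvRaiseWitness_decoupeChaine) ∧ Raises_decoupeChaine (pvRaiseWitness_decoupeChaine) ∧ decoupeChaine_alt (pvRaiseWitness_decoupeChaine) = pvRaiseWitnessOut_decoupeChaine)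

-- ===== LEMMAS AND PROOFS =====

-- spec function: f p cs walks cs comparing each char with the previous one
def fSep (p : Char) (cs : List Char) : List Char :=
  match cs with
  | [] => []
  | c :: rest => (if c == p then [c] else [' ', c]) ++ fSep c rest

theorem aLoop_spec : ∀ (n : Nat) (cs : List Char) (i : Nat) (out : List Char),
    cs.length - i ≤ n → 1 ≤ i →
    aLoop cs i out = out ++ fSep (cs.getD (i - 1) ' ') (cs.drop i) := by
  intro n
  induction n with
  | zero =>
      intro cs i out hn _
      rw [aLoop]
      have : ¬ i < cs.length := by omega
      simp [this, List.drop_eq_nil_of_le (by omega : cs.length ≤ i), fSep]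
  | succ m ih =>
      intro cs i out hn hi
      rw [aLoop]
      by_cases h : i < cs.length
      · simp only [h, if_true]
        rw [ih cs (i + 1) _ (by omega) (by omega)]
        have hdrop : cs.drop i = cs.getD i ' ' :: cs.drop (i + 1) := by
          rw [List.drop_eq_getElem_cons h, List.getD_eq_getElem?_getD,
            List.getElem?_eq_getElem h, Option.getD_some]
        rw [hdrop, fSep]
        simp [List.append_assoc]
      · simp [h, List.drop_eq_nil_of_le (by omega : cs.length ≤ i), fSep]

theorem fSep_run : ∀ (t : List Char) (c : Char) (d : List Char),
    (∀ x ∈ t, (x == c) = true) → fSep c (t ++ d) = t ++ fSep c d := by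
  intro t
  induction t with
  | nil => intro c d _; simp
  | cons x xs ih =>
      intro c d h
      have hx : (x == c) = true := h x (by simp)
      have hxc : x = c := eq_of_beq hx
      simp only [List.cons_append, fSep, hx, if_true]
      rw [hxc, ih c d (fun y hy => h y (by simp [hy]))]
      simp

theorem groups_spec : ∀ (n : Nat) (cs : List Char) (c : Char),
    cs.length ≤ n →
    List.intercalate [' '] (bGroups (c :: cs)) = c :: fSep c cs := by
  intro n
  induction n with
  | zero =>
      intro cs c h
      have : cs = [] := List.eq_nil_of_length_eq_zero (by omega)
      subst this
      simp [bGroups, fSep, List.intercalate]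
  | succ m ih =>
      intro cs c h
      rw [bGroups]
      have hsplit := List.takeWhile_append_dropWhile (p := (· == c)) (l := cs)
      have hrun : ∀ x ∈ cs.takeWhile (· == c), (x == c) = true :=
        fun x hx => List.mem_takeWhile_imp (p := fun y => y == c) hx
      cases hd : cs.dropWhile (· == c) with
      | nil =>
          have hcs : cs = cs.takeWhile (· == c) := by
            conv_lhs => rw [← hsplit]
            simp [hd]
          rw [bGroups]
          simp only [List.intercalate, List.intersperse, List.flatten]
          conv_rhs => rw [hcs, ← List.append_nil (cs.takeWhile (· == c))]
          rw [fSep_run _ _ _ hrun]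
          simp [fSep]
      | cons c' d' =>
          have hc' : (c' == c) = false := by
            have := List.head?_dropWhile_not (· == c) cs
            rw [hd] at this
            simpa using this
          have hlen : d'.length ≤ m := by
            have h1 : (cs.dropWhile (· == c)).length ≤ cs.length :=
              List.length_dropWhile_le _ _
            rw [hd] at h1
            simp at h1
            omega
          have hrec := ih d' c' hlen
          have hcs : cs = cs.takeWhile (· == c) ++ (c' :: d') := by
            conv_lhs => rw [← hsplit]
            rw [hd]
          -- LHS
          have hne : bGroups (c' :: d') ≠ [] := by rw [bGroups]; simp
          have hstep :
              List.intercalate [' ']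
                  ((c :: cs.takeWhile (· == c)) :: bGroups (c' :: d')) =
                (c :: cs.takeWhile (· == c)) ++ [' '] ++
                  List.intercalate [' '] (bGroups (c' :: d')) := by
            cases hg : bGroups (c' :: d') with
            | nil => exact absurd hg hne
            | cons g gs =>
                simp [List.intercalate, List.intersperse]
          rw [hstep, hrec]
          -- RHS
          conv_rhs => rw [hcs]
          rw [fSep_run _ _ _ hrun]
          simp [fSep, hc']

-- ===== VERDICT (by name: the statement is the Claim_ definition above) =====
theorem decoupeChaine_spec : Claim_equal_decoupeChaine := by
  intro s _ hpre
  unfold Spec_decoupeChaine decoupeChaine decoupeChaine_alt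
  cases hs : s.toList with
  | nil =>
      exact absurd (by
        have := congrArg String.ofList hs
        simpa using this) hpre
  | cons c rest =>
      rw [aLoop_spec (c :: rest).length (c :: rest) 1 _ (by omega) (by omega)]
      rw [groups_spec rest.length rest c (le_refl _)]
      simp

theorem decoupeChaine_raises : Claim_raises_decoupeChaine := by
  unfold Claim_raises_decoupeChaine
  constructor
  · intro s _ hr
    unfold Pre_decoupeChaine
    simpa [Raises_decoupeChaine] using hr
  · exact ⟨by decide, by decide, by
      simp [decoupeChaine_alt, pvRaiseWitness_decoupeChaine, pvRaiseWitnessOut_decoupeChaine,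
        bGroups, List.intercalate]⟩

theorem decoupeChaine_raises_witness_ok :
    decoupeChaine_alt pvRaiseWitness_decoupeChaine = pvRaiseWitnessOut_decoupeChaine :=
  decoupeChaine_raises.2.2.2
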